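-- pv_equiv track=rewrite | github.com/kuro961/AtCoder | AtCoderBeginnerContest260/B.py | solve
-- ===== SOURCE A (Python) =====
-- def solve(score, ans, max_num):
--     sort_idx = [i[0] for i in sorted(enumerate(score), key=lambda x: x[1], reverse=True)]
--     cnt = 0
--     for i in sort_idx:
--         if max_num <= cnt:
--             break
--         if i not in ans:
--             cnt += 1
--             ans.append(i)
--     return ans
-- ===== SOURCE B (Python) =====
-- def solve(score, ans, max_num):
--     chosen = set(ans)
--     cnt = 0
--     while cnt < max_num:
--         best = None
--         best_s = None
--         for i, s in enumerate(score):
--             if i not in chosen and (best is None or best_s < s):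
--                 best, best_s = i, s
--         if best is None:
--             break
--         ans.append(best)
--         chosen.add(best)
--         cnt += 1
--     return ans
-- ===== Notes on version B (the rewrite author's own statement) =====
-- stated objective: alternative
-- what changed: B drops the full sort of enumerate(score): it repeatedly scans for the strictly-best index not yet in a chosen-set (selection with strict > so ties keep the lowest index), at most max_num times, instead of sorting all indices by score descending and filtering them in order.
import Mathlib
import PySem

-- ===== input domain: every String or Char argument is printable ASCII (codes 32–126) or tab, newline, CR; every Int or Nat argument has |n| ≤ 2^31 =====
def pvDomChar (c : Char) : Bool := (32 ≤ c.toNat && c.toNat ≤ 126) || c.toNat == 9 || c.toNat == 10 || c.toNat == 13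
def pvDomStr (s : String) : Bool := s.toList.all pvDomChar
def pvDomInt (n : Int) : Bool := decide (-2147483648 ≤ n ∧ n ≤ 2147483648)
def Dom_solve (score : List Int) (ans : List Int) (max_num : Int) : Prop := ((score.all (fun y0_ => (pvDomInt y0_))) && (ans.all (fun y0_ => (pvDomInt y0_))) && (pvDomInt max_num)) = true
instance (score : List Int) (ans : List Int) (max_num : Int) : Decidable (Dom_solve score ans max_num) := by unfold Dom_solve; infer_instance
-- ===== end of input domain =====

-- B replaces sort-then-scan by repeated maximum selection (alternative algorithm);
-- equivalence is about the RETURN value (the Python A and B both append the same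
-- elements to the caller's `ans` list in place).

-- ===== PORT A =====
-- the for-loop over sort_idx with cnt and the break
def solveLoop (max_num : Int) : List Int → Int → List Int → List Int
  | [], _, ans => ans
  | i :: rest, cnt, ans =>
    if max_num ≤ cnt then ans
    else if i ∈ ans then solveLoop max_num rest cnt ans
    else solveLoop max_num rest (cnt + 1) (ans ++ [i])

def solve (score : List Int) (ans : List Int) (max_num : Int) : List Int :=
  let sort_idx := (PySem.List.sorted (PySem.List.enumerate score) (fun x => x.2) true).map (fun i => i.1)
  solveLoop max_num sort_idx 0 ans

-- ===== PORT B =====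
-- one step of B's inner scan: keep `best` unless i is eligible and strictly better
def pickStep (E : List Int) (acc : Option (Int × Int)) (p : Int × Int) : Option (Int × Int) :=
  match acc with
  | none => if p.1 ∉ E then some p else none
  | some q => if p.1 ∉ E ∧ q.2 < p.2 then some p else some q

-- B's inner for-loop over enumerate(score)
def pickBest (score : List Int) (E : List Int) : Option (Int × Int) :=
  (PySem.List.enumerate score).foldl (pickStep E) none

-- B's while-loop
def solveAltLoop (score : List Int) (max_num : Int) (ans : List Int) (chosen : PySem.Set Int) (cnt : Int) : List Int :=
  if _h : cnt < max_num then
    match pickBest score chosen with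
    | none => ans
    | some p => solveAltLoop score max_num (ans ++ [p.1]) (PySem.Set.add chosen p.1) (cnt + 1)
  else ans
termination_by (max_num - cnt).toNat
decreasing_by omega

def solve_alt (score : List Int) (ans : List Int) (max_num : Int) : List Int :=
  solveAltLoop score max_num ans (PySem.Set.ofList ans) 0

-- ===== PRECONDITION & SPEC =====
def Spec_solve (score : List Int) (ans : List Int) (max_num : Int) (out : List Int) : Prop := out = solve_alt score ans max_num
instance (score : List Int) (ans : List Int) (max_num : Int) (out : List Int) : Decidable (Spec_solve score ans max_num out) := by unfold Spec_solve; infer_instance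

-- ===== CLAIM (what is proved, stated in full; the proofs are below) =====
def Claim_equal_solve : Prop := ∀ (score : List Int) (ans : List Int) (max_num : Int), Dom_solve score ans max_num → Spec_solve score ans max_num (solve score ans max_num)

-- ===== LEMMAS AND PROOFS =====

-- the strict "sorted order" of A: higher score first, ties by lower index
def pvR (a b : Int × Int) : Prop := b.2 < a.2 ∨ (a.2 = b.2 ∧ a.1 < b.1)

lemma pvR_asymm {a b : Int × Int} (h1 : pvR a b) (h2 : pvR b a) : False := by
  unfold pvR at *; omega

lemma pvR_trans {a b c : Int × Int} (h1 : pvR a b) (h2 : pvR b c) : pvR a c := by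
  unfold pvR at *; omega

lemma insertBy_pwR (x : Int × Int) (acc : List (Int × Int))
    (h : acc.Pairwise pvR) (hx : ∀ a ∈ acc, a.1 < x.1) :
    (PySem.List.insertBy (fun a b => decide (b.2 < a.2)) x acc).Pairwise pvR := by
  induction acc with
  | nil => simp [PySem.List.insertBy]
  | cons y ys ih =>
    rw [List.pairwise_cons] at h
    simp only [PySem.List.insertBy]
    split
    · rename_i hb
      simp only [decide_eq_true_eq] at hb
      refine List.Pairwise.cons ?_ (List.pairwise_cons.mpr h)
      intro z hz
      rcases List.mem_cons.mp hz with rfl | hz'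
      · exact Or.inl hb
      · have := h.1 z hz'
        unfold pvR at *; omega
    · rename_i hb
      simp only [decide_eq_true_eq] at hb
      refine List.Pairwise.cons ?_ (ih h.2 (fun a ha => hx a (List.mem_cons_of_mem _ ha)))
      intro z hz
      rcases (PySem.List.mem_insertBy _ _ _ _).mp hz with rfl | hz'
      · have hy1 : y.1 < z.1 := hx y List.mem_cons_self
        unfold pvR; omega
      · exact h.1 z hz'

lemma foldl_ins_pwR : ∀ (xs : List (Int × Int)) (acc : List (Int × Int)),
    acc.Pairwise pvR → (∀ a ∈ acc, ∀ b ∈ xs, a.1 < b.1) →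
    xs.Pairwise (fun a b => a.1 < b.1) →
    (xs.foldl (fun acc x => PySem.List.insertBy (fun a b => decide (b.2 < a.2)) x acc) acc).Pairwise pvR := by
  intro xs
  induction xs with
  | nil => intro acc h _ _; simpa using h
  | cons x rest ih =>
    intro acc h hcross hpw
    rw [List.pairwise_cons] at hpw
    simp only [List.foldl_cons]
    apply ih
    · exact insertBy_pwR x acc h (fun a ha => hcross a ha x List.mem_cons_self)
    · intro a ha b hb
      rcases (PySem.List.mem_insertBy _ _ _ _).mp ha with rfl | ha'
      · exact hpw.1 b hb
      · exact hcross a ha' b (List.mem_cons_of_mem _ hb)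
    · exact hpw.2

lemma sorted_pwR (score : List Int) :
    (PySem.List.sorted (PySem.List.enumerate score) (fun x => x.2) true).Pairwise pvR := by
  rw [PySem.List.sorted_rev_eq_foldl_insertBy]
  exact foldl_ins_pwR _ [] (by simp) (by simp) (PySem.List.pairwise_lt_enumerate score 0)

lemma pick_go (E : List Int) :
    ∀ (xs : List (Int × Int)) (acc : Option (Int × Int)),
      xs.Pairwise (fun a b => a.1 < b.1) →
      (∀ q0, acc = some q0 → q0.1 ∉ E ∧ ∀ x ∈ xs, q0.1 < x.1) →
      (xs.foldl (pickStep E) acc = acc ∧ ∀ x ∈ xs, x.1 ∈ E) ∨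
      (∃ q, xs.foldl (pickStep E) acc = some q ∧ q.1 ∉ E ∧ (acc = some q ∨ q ∈ xs) ∧
        (∀ x ∈ xs, x.1 ∉ E → q = x ∨ pvR q x) ∧ (∀ q0, acc = some q0 → q = q0 ∨ pvR q q0)) := by
  intro xs
  induction xs with
  | nil => intro acc _ _; left; simp
  | cons x rest ih =>
    intro acc hpw hacc
    rw [List.pairwise_cons] at hpw
    simp only [List.foldl_cons]
    by_cases hx : x.1 ∈ E
    · -- x ineligible: pickStep keeps acc
      have hstep : pickStep E acc x = acc := by
        cases acc with
        | none => simp [pickStep, hx]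
        | some q => simp [pickStep, hx]
      rw [hstep]
      rcases ih acc hpw.2 (fun q0 hq0 => ⟨(hacc q0 hq0).1,
          fun y hy => (hacc q0 hq0).2 y (List.mem_cons_of_mem _ hy)⟩) with ⟨he, hall⟩ | ⟨q, hq, hqE, hmem, hdom, hdacc⟩
      · left
        refine ⟨he, ?_⟩
        intro y hy
        rcases List.mem_cons.mp hy with rfl | hy'
        · exact hx
        · exact hall y hy'
      · right
        refine ⟨q, hq, hqE, ?_, ?_, hdacc⟩
        · rcases hmem with h | h
          · exact Or.inl h
          · exact Or.inr (List.mem_cons_of_mem _ h)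
        · intro y hy hyE
          rcases List.mem_cons.mp hy with rfl | hy'
          · exact absurd hx hyE
          · exact hdom y hy' hyE
    · -- x eligible
      cases acc with
      | none =>
        have hstep : pickStep E none x = some x := by simp [pickStep, hx]
        rw [hstep]
        have hacc' : ∀ q0, (some x : Option (Int × Int)) = some q0 → q0.1 ∉ E ∧ ∀ y ∈ rest, q0.1 < y.1 := by
          intro q0 hq0
          injection hq0 with h
          subst h
          exact ⟨hx, hpw.1⟩
        rcases ih (some x) hpw.2 hacc' with ⟨he, hall⟩ | ⟨q, hq, hqE, hmem, hdom, hdacc⟩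
        · right
          refine ⟨x, he, hx, Or.inr List.mem_cons_self, ?_, by simp⟩
          intro y hy hyE
          rcases List.mem_cons.mp hy with rfl | hy'
          · exact Or.inl rfl
          · exact absurd (hall y hy') hyE
        · right
          refine ⟨q, hq, hqE, ?_, ?_, by simp⟩
          · rcases hmem with h | h
            · injection h with h; exact Or.inr (List.mem_cons.mpr (Or.inl h.symm))
            · exact Or.inr (List.mem_cons_of_mem _ h)
          · intro y hy hyE
            rcases List.mem_cons.mp hy with rfl | hy'
            · rcases hdacc y rfl with h | h
              · exact Or.inl h
              · exact Or.inr h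
            · exact hdom y hy' hyE
      | some q0 =>
        obtain ⟨hq0E, hq0lt⟩ := hacc q0 rfl
        by_cases hrep : q0.2 < x.2
        · -- replace: acc' = some x ; moreover pvR x q0
          have hRxq0 : pvR x q0 := Or.inl hrep
          have hstep : pickStep E (some q0) x = some x := by
            simp [pickStep, hx, hrep]
          rw [hstep]
          have hacc' : ∀ qq, (some x : Option (Int × Int)) = some qq → qq.1 ∉ E ∧ ∀ y ∈ rest, qq.1 < y.1 := by
            intro qq hqq; injection hqq with h; subst h; exact ⟨hx, hpw.1⟩
          rcases ih (some x) hpw.2 hacc' with ⟨he, hall⟩ | ⟨q, hq, hqE, hmem, hdom, hdacc⟩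
          · right
            refine ⟨x, he, hx, Or.inr List.mem_cons_self, ?_, ?_⟩
            · intro y hy hyE
              rcases List.mem_cons.mp hy with rfl | hy'
              · exact Or.inl rfl
              · exact absurd (hall y hy') hyE
            · intro qq hqq; injection hqq with h; subst h; exact Or.inr hRxq0
          · right
            have hqx : q = x ∨ pvR q x := by
              rcases hmem with h | h
              · injection h with h; exact Or.inl h.symm
              · rcases hdacc x rfl with h' | h'
                · exact Or.inl h'
                · exact Or.inr h'
            refine ⟨q, hq, hqE, ?_, ?_, ?_⟩
            · rcases hmem with h | h
              · injection h with h; exact Or.inr (List.mem_cons.mpr (Or.inl h.symm))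
              · exact Or.inr (List.mem_cons_of_mem _ h)
            · intro y hy hyE
              rcases List.mem_cons.mp hy with rfl | hy'
              · exact hqx
              · exact hdom y hy' hyE
            · intro qq hqq; injection hqq with h; subst h
              rcases hqx with rfl | h
              · exact Or.inr hRxq0
              · exact Or.inr (pvR_trans h hRxq0)
        · -- keep q0; pvR q0 x
          have hRq0x : pvR q0 x := by
            have := hq0lt x List.mem_cons_self
            unfold pvR; omega
          have hstep : pickStep E (some q0) x = some q0 := by
            simp [pickStep, hrep]
          rw [hstep]
          have hacc' : ∀ qq, (some q0 : Option (Int × Int)) = some qq → qq.1 ∉ E ∧ ∀ y ∈ rest, qq.1 < y.1 := by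
            intro qq hqq; injection hqq with h; subst h
            exact ⟨hq0E, fun y hy => hq0lt y (List.mem_cons_of_mem _ hy)⟩
          rcases ih (some q0) hpw.2 hacc' with ⟨he, hall⟩ | ⟨q, hq, hqE, hmem, hdom, hdacc⟩
          · right
            refine ⟨q0, he, hq0E, Or.inl rfl, ?_, by simp⟩
            intro y hy hyE
            rcases List.mem_cons.mp hy with rfl | hy'
            · exact Or.inr hRq0x
            · exact absurd (hall y hy') hyE
          · right
            have hqq0 : q = q0 ∨ pvR q q0 := by
              rcases hmem with h | h
              · injection h with h; exact Or.inl h.symm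
              · rcases hdacc q0 rfl with h' | h'
                · exact Or.inl h'
                · exact Or.inr h'
            refine ⟨q, hq, hqE, ?_, ?_, ?_⟩
            · rcases hmem with h | h
              · exact Or.inl h
              · exact Or.inr (List.mem_cons_of_mem _ h)
            · intro y hy hyE
              rcases List.mem_cons.mp hy with rfl | hy'
              · rcases hqq0 with rfl | h
                · exact Or.inr hRq0x
                · exact Or.inr (pvR_trans h hRq0x)
              · exact hdom y hy' hyE
            · intro qq hqq; injection hqq with h; subst h; exact hqq0

lemma pickBest_eq (score : List Int) (E : List Int) (l : List (Int × Int))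
    (hpw : l.Pairwise pvR)
    (hperm : (l.filter (fun p => decide (p.1 ∉ E))).Perm
             ((PySem.List.enumerate score).filter (fun p => decide (p.1 ∉ E)))) :
    pickBest score E = (l.filter (fun p => decide (p.1 ∉ E))).head? := by
  unfold pickBest
  rcases pick_go E (PySem.List.enumerate score) none (PySem.List.pairwise_lt_enumerate score 0)
      (by simp) with ⟨he, hall⟩ | ⟨q, hq, hqE, hmem, hdom, _⟩
  · rw [he]
    have hE : (PySem.List.enumerate score).filter (fun p => decide (p.1 ∉ E)) = [] := by
      rw [List.filter_eq_nil_iff]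
      intro a ha
      simpa using hall a ha
    rw [hE] at hperm
    rw [List.Perm.eq_nil hperm]
    rfl
  · rw [hq]
    have hqEnum : q ∈ PySem.List.enumerate score := by
      rcases hmem with h | h
      · cases h
      · exact h
    have hqFe : q ∈ (PySem.List.enumerate score).filter (fun p => decide (p.1 ∉ E)) :=
      List.mem_filter.mpr ⟨hqEnum, by simpa using hqE⟩
    have hqF : q ∈ l.filter (fun p => decide (p.1 ∉ E)) := hperm.mem_iff.mpr hqFe
    cases hF : l.filter (fun p => decide (p.1 ∉ E)) with
    | nil => rw [hF] at hqF; cases hqF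
    | cons p t =>
      rw [hF] at hqF
      have hpF : p ∈ l.filter (fun p => decide (p.1 ∉ E)) := by rw [hF]; exact List.mem_cons_self
      have hpE : p.1 ∉ E := by simpa using (List.mem_filter.mp hpF).2
      have hpEnum : p ∈ PySem.List.enumerate score :=
        (List.mem_filter.mp (hperm.subset hpF)).1
      have hdp : q = p ∨ pvR q p := hdom p hpEnum hpE
      have hpwF : (l.filter (fun p => decide (p.1 ∉ E))).Pairwise pvR := hpw.filter _
      rw [hF, List.pairwise_cons] at hpwF
      rcases List.mem_cons.mp hqF with rfl | hqt
      · rfl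
      · rcases hdp with rfl | hRqp
        · rfl
        · exact absurd (pvR_asymm hRqp (hpwF.1 q hqt)) (fun h => h)

lemma loop_eq (score : List Int) (max_num : Int) :
    ∀ (l : List (Int × Int)) (E : List Int) (chosen : PySem.Set Int) (cnt : Int),
      l.Pairwise pvR → l.Pairwise (fun a b => a.1 ≠ b.1) →
      (∀ x : Int, x ∈ chosen ↔ x ∈ E) →
      (l.filter (fun p => decide (p.1 ∉ E))).Perm
        ((PySem.List.enumerate score).filter (fun p => decide (p.1 ∉ E))) →
      solveLoop max_num (l.map (fun i => i.1)) cnt E = solveAltLoop score max_num E chosen cnt := by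
  intro l
  induction l with
  | nil =>
    intro E chosen cnt _ _ hch hperm
    have hfc : ∀ (m : List (Int × Int)), m.filter (fun p => decide (p.1 ∉ chosen))
        = m.filter (fun p => decide (p.1 ∉ E)) :=
      fun m => List.filter_congr (fun x _ => by simp [hch])
    simp only [List.map_nil, solveLoop]
    rw [solveAltLoop]
    split
    · rw [pickBest_eq score chosen [] (by simp) (by rw [hfc, hfc]; exact hperm)]
      rfl
    · rfl
  | cons p rest ih =>
    intro E chosen cnt hpw hne hch hperm
    have hfc : ∀ (m : List (Int × Int)), m.filter (fun p => decide (p.1 ∉ chosen))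
        = m.filter (fun p => decide (p.1 ∉ E)) :=
      fun m => List.filter_congr (fun x _ => by simp [hch])
    rw [List.pairwise_cons] at hpw hne
    simp only [List.map_cons, solveLoop]
    by_cases hc : max_num ≤ cnt
    · rw [if_pos hc, solveAltLoop, dif_neg (by omega)]
    · rw [if_neg hc]
      by_cases hp : p.1 ∈ E
      · rw [if_pos hp]
        apply ih E chosen cnt hpw.2 hne.2 hch
        rw [List.filter_cons] at hperm
        simpa [hp] using hperm
      · rw [if_neg hp]
        have hFcons : (p :: rest).filter (fun x => decide (x.1 ∉ E))
            = p :: rest.filter (fun x => decide (x.1 ∉ E)) := by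
          simp [hp]
        have hpick : pickBest score chosen = some p := by
          rw [pickBest_eq score chosen (p :: rest) (List.pairwise_cons.mpr hpw)
            (by rw [hfc, hfc]; exact hperm), hfc, hFcons]
          rfl
        rw [solveAltLoop, dif_pos (by omega), hpick]
        apply ih (E ++ [p.1]) (PySem.Set.add chosen p.1) (cnt + 1) hpw.2 hne.2
          (fun x => by simp [PySem.Set.mem_add, hch, List.mem_append])
        -- new eligibility: x.1 ∉ E ++ [p.1]
        have hgrest : ∀ x ∈ rest, (decide (x.1 ∉ E ++ [p.1])) = (decide (x.1 ∉ E)) := by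
          intro x hx
          have hxne : x.1 ≠ p.1 := fun h => (hne.1 x hx) h.symm
          simp [List.mem_append, hxne]
        have h1 : rest.filter (fun x => decide (x.1 ∉ E ++ [p.1]))
            = rest.filter (fun x => decide (x.1 ∉ E)) := List.filter_congr hgrest
        have h3 : (PySem.List.enumerate score).filter (fun x => decide (x.1 ∉ E ++ [p.1]))
            = ((PySem.List.enumerate score).filter (fun x => decide (x.1 ∉ E))).filter
                (fun x => decide (x.1 ≠ p.1)) := by
          rw [List.filter_filter]
          apply List.filter_congr
          intro x _
          simp [List.mem_append, and_comm]
        have h2 : ((p :: rest).filter (fun x => decide (x.1 ∉ E))).filter (fun x => decide (x.1 ≠ p.1))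
            = rest.filter (fun x => decide (x.1 ∉ E)) := by
          rw [hFcons, List.filter_cons]
          simp only [ne_eq, not_true_eq_false, decide_false]
          rw [if_neg (by simp)]
          apply List.filter_eq_self.mpr
          intro x hx
          have hxr : x ∈ rest := (List.mem_filter.mp hx).1
          have hxne : x.1 ≠ p.1 := fun h => (hne.1 x hxr) h.symm
          simpa using hxne
        rw [h1, h3]
        exact h2 ▸ hperm.filter (fun x => decide (x.1 ≠ p.1))

-- ===== VERDICT (by name: the statement is the Claim_ definition above) =====
theorem solve_spec : Claim_equal_solve := by
  intro score ans max_num _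
  unfold Spec_solve solve solve_alt
  apply loop_eq score max_num _ ans (PySem.Set.ofList ans) 0 (sorted_pwR score)
  · exact ((PySem.List.sorted_perm _ _ _).pairwise_iff (fun {a b} h => h.symm)).mpr
      ((PySem.List.pairwise_lt_enumerate score 0).imp (fun h => ne_of_lt h))
  · exact fun x => PySem.Set.mem_ofList ans x
  · exact (PySem.List.sorted_perm _ _ _).filter _
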